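-- pv_equiv track=rewrite | github.com/move-geun/baekjoon_py | 프로그래머스/unrated/161989. 덧칠하기/덧칠하기.py | solution
-- ===== SOURCE A (Python) =====
-- def solution(n, m, section):
--     answer = 0
--     while section:
--         start = section[0]
--         end = start + m -1
--
--         while section:
--             if section[0] <= end:
--                 section.remove(section[0])
--             else:
--                 break;
--         answer += 1
--
--     return answer
-- ===== SOURCE B (Python) =====
-- def solution(n, m, section):
--     answer = 0
--     end = None
--     for x in section:
--         if end is None or x > end:
--             answer += 1
--             end = x + m - 1
--     return answer
-- ===== Notes on version B (the rewrite author's own statement) =====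
-- stated objective: faster
-- what changed: Replaced the nested while loops that repeatedly call list.remove on the front of the list with a single left-to-right pass that tracks the end of the last painted roller; note A empties its 'section' argument in place while B leaves it untouched (return values agree).
import Mathlib
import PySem

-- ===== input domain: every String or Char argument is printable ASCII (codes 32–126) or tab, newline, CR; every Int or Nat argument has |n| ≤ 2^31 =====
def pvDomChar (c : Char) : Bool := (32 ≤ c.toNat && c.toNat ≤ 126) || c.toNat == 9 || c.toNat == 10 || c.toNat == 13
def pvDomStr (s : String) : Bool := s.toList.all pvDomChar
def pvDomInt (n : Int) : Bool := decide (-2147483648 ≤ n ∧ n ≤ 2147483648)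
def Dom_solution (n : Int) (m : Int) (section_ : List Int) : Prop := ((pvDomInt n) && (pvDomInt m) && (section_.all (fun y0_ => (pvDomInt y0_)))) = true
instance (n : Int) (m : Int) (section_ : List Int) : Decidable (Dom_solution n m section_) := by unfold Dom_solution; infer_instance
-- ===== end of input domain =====

-- B replaces A's nested while loops (with list.remove from the front) by one linear pass
-- tracking the end of the last roller; A empties its list argument in place, B does not
-- (the equivalence proved here is about the return value).

-- ===== PORT A =====
-- inner while loop: section.remove(section[0]) removes the first occurrence of the head,
-- i.e. the head itself, so the loop drops leading elements ≤ end and breaks at the first larger one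
def solInner (e : Int) : List Int → List Int
  | [] => []
  | x :: rest => if x ≤ e then solInner e rest else x :: rest

-- outer while loop, fueled by the initial length (each iteration removes at least the head when 1 ≤ m;
-- for m ≤ 0 with a nonempty list the Python loops forever — excluded by Pre_solution)
def solOuter (m : Int) : Nat → List Int → Int → Int
  | 0, _, answer => answer
  | _ + 1, [], answer => answer
  | fuel + 1, x :: rest, answer => solOuter m fuel (solInner (x + m - 1) (x :: rest)) (answer + 1)

def solution (n : Int) (m : Int) (section_ : List Int) : Int :=
  solOuter m section_.length section_ 0

-- ===== PORT B =====
-- for-loop state: (answer, end); end is None before the first roller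
def solution_alt (n : Int) (m : Int) (section_ : List Int) : Int :=
  (section_.foldl
    (fun (st : Int × Option Int) x =>
      match st.2 with
      | none => (st.1 + 1, some (x + m - 1))
      | some e => if x > e then (st.1 + 1, some (x + m - 1)) else st)
    ((0 : Int), (none : Option Int))).1

-- ===== PRECONDITION & SPEC =====
-- Pre_ excludes m ≤ 0 with a nonempty section, on which Python A loops forever (never returns).
def Pre_solution (n : Int) (m : Int) (section_ : List Int) : Prop := section_ = [] ∨ 1 ≤ m
instance (n : Int) (m : Int) (section_ : List Int) : Decidable (Pre_solution n m section_) := by unfold Pre_solution; infer_instance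
def pvWitness_solution : Int × Int × List Int := (8, 4, [2, 4, 6, 11])
def Spec_solution (n : Int) (m : Int) (section_ : List Int) (out : Int) : Prop := out = solution_alt n m section_
instance (n : Int) (m : Int) (section_ : List Int) (out : Int) : Decidable (Spec_solution n m section_ out) := by unfold Spec_solution; infer_instance

-- ===== CLAIM (what is proved, stated in full; the proofs are below) =====
def Claim_equal_solution : Prop := ∀ (n : Int) (m : Int) (section_ : List Int), Dom_solution n m section_ → Pre_solution n m section_ → Spec_solution n m section_ (solution n m section_)

-- ===== LEMMAS AND PROOFS =====

theorem solInner_length_le (e : Int) (s : List Int) : (solInner e s).length ≤ s.length := by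
  induction s with
  | nil => simp [solInner]
  | cons x rest ih =>
    simp only [solInner]
    split
    · exact Nat.le_succ_of_le ih
    · simp

theorem solOuter_nil (m : Int) (f : Nat) (ans : Int) : solOuter m f [] ans = ans := by
  cases f <;> rfl

-- fuel irrelevance: any fuel ≥ the list length gives the same result (when 1 ≤ m)
theorem solOuter_fuel (m : Int) (hm : 1 ≤ m) :
    ∀ (f g : Nat) (s : List Int) (ans : Int), s.length ≤ f → s.length ≤ g →
      solOuter m f s ans = solOuter m g s ans := by
  intro f
  induction f with
  | zero =>
    intro g s ans hf _
    have : s = [] := List.eq_nil_of_length_eq_zero (Nat.le_zero.mp hf)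
    subst this
    simp [solOuter_nil]
  | succ f ih =>
    intro g s ans hf hg
    cases s with
    | nil => simp [solOuter_nil]
    | cons x rest =>
      cases g with
      | zero => simp at hg
      | succ g =>
        simp only [solOuter]
        have hx : x ≤ x + m - 1 := by omega
        have hdrop : solInner (x + m - 1) (x :: rest) = solInner (x + m - 1) rest := by
          simp [solInner, hx]
        have hlen : (solInner (x + m - 1) (x :: rest)).length ≤ rest.length := by
          rw [hdrop]; exact solInner_length_le _ _
        have hf' : (solInner (x + m - 1) (x :: rest)).length ≤ f := by
          simp at hf; omega
        have hg' : (solInner (x + m - 1) (x :: rest)).length ≤ g := by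
          simp at hg; omega
        exact ih g _ _ hf' hg'

-- one step of B's fold
def stepB (m : Int) (st : Int × Option Int) (x : Int) : Int × Option Int :=
  match st.2 with
  | none => (st.1 + 1, some (x + m - 1))
  | some e => if x > e then (st.1 + 1, some (x + m - 1)) else st

theorem foldB_eq (m : Int) (s : List Int) (st : Int × Option Int) :
    s.foldl
      (fun (st : Int × Option Int) x =>
        match st.2 with
        | none => (st.1 + 1, some (x + m - 1))
        | some e => if x > e then (st.1 + 1, some (x + m - 1)) else st)
      st = s.foldl (stepB m) st := by
  rfl

-- B's fold from state (ans, some e) computes A's outer loop on the list with the ≤ e prefix dropped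
theorem foldB_some (m : Int) (hm : 1 ≤ m) (s : List Int) :
    ∀ (ans e : Int),
      (s.foldl (stepB m) (ans, some e)).1 = solOuter m s.length (solInner e s) ans := by
  induction s with
  | nil => intro ans e; simp [solInner, solOuter_nil]
  | cons x rest ih =>
    intro ans e
    by_cases hx : x ≤ e
    · have hstep : stepB m (ans, some e) x = (ans, some e) := by
        simp [stepB]; omega
      have h1 : solInner e (x :: rest) = solInner e rest := by simp [solInner, hx]
      rw [List.foldl_cons, hstep, ih ans e, h1]
      exact solOuter_fuel m hm _ _ _ _ (solInner_length_le _ _)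
        (le_trans (solInner_length_le _ _) (Nat.le_succ _))
    · have hstep : stepB m (ans, some e) x = (ans + 1, some (x + m - 1)) := by
        simp [stepB]; omega
      have h1 : solInner e (x :: rest) = x :: rest := by simp [solInner, hx]
      have hx' : x ≤ x + m - 1 := by omega
      have h2 : solInner (x + m - 1) (x :: rest) = solInner (x + m - 1) rest := by
        simp [solInner, hx']
      rw [List.foldl_cons, hstep, ih (ans + 1) (x + m - 1), h1]
      simp only [List.length_cons, solOuter, h2]

-- ===== VERDICT (by name: the statement is the Claim_ definition above) =====
theorem solution_spec : Claim_equal_solution := by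
  intro n m section_ _ hpre
  unfold Spec_solution solution solution_alt
  rw [foldB_eq]
  cases section_ with
  | nil => simp [solOuter_nil]
  | cons x rest =>
    rcases hpre with h | hm
    · exact absurd h (by simp)
    · have hstep : stepB m ((0 : Int), (none : Option Int)) x = (1, some (x + m - 1)) := rfl
      have hx' : x ≤ x + m - 1 := by omega
      have h2 : solInner (x + m - 1) (x :: rest) = solInner (x + m - 1) rest := by
        simp [solInner, hx']
      rw [List.foldl_cons, hstep, foldB_some m hm rest 1 (x + m - 1)]
      simp only [List.length_cons, solOuter, h2]
      norm_num
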